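-- pv_equiv track=rewrite | github.com/vietlubu/deepwiki-open | scripts/generate_wiki_cli.py | summarize_file_tree
-- ===== SOURCE A (Python) =====
-- from typing import Any, Dict, List, Optional, Tuple
--
-- def summarize_file_tree(file_tree: str, max_lines: int = 1800, max_chars: int = 90000) -> Tuple[str, bool]:
--     lines = [line.strip() for line in file_tree.splitlines() if line.strip()]
--     out: List[str] = []
--     size = 0
--     for line in lines:
--         next_size = size + len(line) + 1
--         if len(out) >= max_lines or next_size > max_chars:
--             return "\n".join(out), True
--         out.append(line)
--         size = next_size
--     return "\n".join(out), False
-- ===== SOURCE B (Python) =====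
-- from itertools import accumulate
-- from bisect import bisect_right
-- from typing import Tuple
--
-- def summarize_file_tree(file_tree: str, max_lines: int = 1800, max_chars: int = 90000) -> Tuple[str, bool]:
--     lines = [line.strip() for line in file_tree.splitlines() if line.strip()]
--     cum = list(accumulate(len(line) + 1 for line in lines))
--     keep = max(0, min(max_lines, bisect_right(cum, max_chars)))
--     return "\n".join(lines[:keep]), keep < len(lines)
-- ===== Notes on version B (the rewrite author's own statement) =====
-- stated objective: alternative
-- what changed: Replaced the incremental accumulate-and-break loop by a cumulative-size prefix table queried with bisect_right for the char budget, clamped against the line budget, followed by a single slice-and-join.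
import Mathlib
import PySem

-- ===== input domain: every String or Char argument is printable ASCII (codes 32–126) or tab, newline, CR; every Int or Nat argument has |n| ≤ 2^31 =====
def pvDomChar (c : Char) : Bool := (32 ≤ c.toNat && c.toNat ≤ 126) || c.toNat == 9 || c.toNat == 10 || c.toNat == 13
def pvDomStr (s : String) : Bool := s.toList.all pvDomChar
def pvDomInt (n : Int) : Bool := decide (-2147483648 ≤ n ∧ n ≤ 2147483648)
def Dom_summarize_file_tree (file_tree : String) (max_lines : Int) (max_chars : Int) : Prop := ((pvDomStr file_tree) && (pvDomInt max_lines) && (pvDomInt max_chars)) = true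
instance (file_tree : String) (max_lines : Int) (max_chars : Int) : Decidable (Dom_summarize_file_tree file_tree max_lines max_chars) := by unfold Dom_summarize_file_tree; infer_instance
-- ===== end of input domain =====

-- B replaces A's accumulate-and-break loop by a prefix-sum table + bisect_right query + one slice-and-join (alternative decomposition, same cost).

-- ===== PORT A =====
-- A's for-loop with early return: state (out, size); line budget ml, char budget mc.
def pvLoopA : List String → List String → Int → Int → Int → String × Bool
  | [], out, _, _, _ => (PySem.Str.join "\n" out, false)
  | l :: rest, out, size, ml, mc =>
    let next := size + PySem.Str.len l + 1
    if (out.length : Int) ≥ ml ∨ next > mc then (PySem.Str.join "\n" out, true)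
    else pvLoopA rest (out ++ [l]) next ml mc

def summarize_file_tree (file_tree : String) (max_lines : Int) (max_chars : Int) : String × Bool :=
  let lines := ((PySem.Str.splitlines file_tree).map PySem.Str.strip).filter (fun l => l ≠ "")
  pvLoopA lines [] 0 max_lines max_chars

-- ===== PORT B =====
-- itertools.accumulate over (len(line) + 1 for line in lines): running prefix sums from acc.
def pvCum : Int → List String → List Int
  | _, [] => []
  | acc, l :: rest => (acc + PySem.Str.len l + 1) :: pvCum (acc + PySem.Str.len l + 1) rest

def summarize_file_tree_alt (file_tree : String) (max_lines : Int) (max_chars : Int) : String × Bool :=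
  let lines := ((PySem.Str.splitlines file_tree).map PySem.Str.strip).filter (fun l => l ≠ "")
  let cum := pvCum 0 lines
  let keep := max 0 (min max_lines ((PySem.List.bisectRight cum max_chars : Nat) : Int))
  (PySem.Str.join "\n" (lines.take keep.toNat), decide (keep < PySem.List.len lines))

-- ===== PRECONDITION & SPEC =====
def Spec_summarize_file_tree (file_tree : String) (max_lines : Int) (max_chars : Int) (out : String × Bool) : Prop := out = summarize_file_tree_alt file_tree max_lines max_chars
instance (file_tree : String) (max_lines : Int) (max_chars : Int) (out : String × Bool) : Decidable (Spec_summarize_file_tree file_tree max_lines max_chars out) := by unfold Spec_summarize_file_tree; infer_instance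

-- ===== CLAIM (what is proved, stated in full; the proofs are below) =====
def Claim_equal_summarize_file_tree : Prop := ∀ (file_tree : String) (max_lines : Int) (max_chars : Int), Dom_summarize_file_tree file_tree max_lines max_chars → Spec_summarize_file_tree file_tree max_lines max_chars (summarize_file_tree file_tree max_lines max_chars)

-- ===== LEMMAS AND PROOFS =====

-- greedy char-budget count: how many leading lines fit when the running size starts at s
def pvCnt : List String → Int → Int → Int
  | [], _, _ => 0
  | l :: r, s, mc => if s + PySem.Str.len l + 1 ≤ mc then 1 + pvCnt r (s + PySem.Str.len l + 1) mc else 0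

lemma pvCnt_nonneg (lines : List String) (s mc : Int) : 0 ≤ pvCnt lines s mc := by
  induction lines generalizing s with
  | nil => simp [pvCnt]
  | cons l r ih =>
    simp only [pvCnt]; split
    · have := ih (s + PySem.Str.len l + 1); omega
    · omega

-- A's loop returns "\n".join(out ++ first k remaining lines) and whether it stopped early,
-- where k clamps the remaining line budget against the greedy char-budget count.
lemma pvLoopA_eq (lines : List String) (out : List String) (size ml mc : Int) :
    pvLoopA lines out size ml mc =
      (PySem.Str.join "\n" (out ++ lines.take (max 0 (min (ml - out.length) (pvCnt lines size mc))).toNat),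
       decide (max 0 (min (ml - out.length) (pvCnt lines size mc)) < (lines.length : Int))) := by
  induction lines generalizing out size with
  | nil =>
    have hk : max 0 (min (ml - (out.length:Int)) (pvCnt [] size mc)) = 0 := by
      simp only [pvCnt]; omega
    rw [hk] at *
    simp [pvLoopA]
  | cons l rest ih =>
    simp only [pvLoopA, pvCnt]
    by_cases h : (out.length : Int) ≥ ml ∨ size + PySem.Str.len l + 1 > mc
    · rw [if_pos h]
      have hc := pvCnt_nonneg rest (size + PySem.Str.len l + 1) mc
      have hk : (max 0 (min (ml - out.length) (pvCnt (l :: rest) size mc))) = 0 := by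
        simp only [pvCnt]
        rcases h with h | h
        · split <;> omega
        · rw [if_neg (by omega)]; omega
      simp only [pvCnt] at hk
      simp only [hk]
      simp
    · rw [if_neg h]
      simp only [not_or, not_le, not_lt, ge_iff_le] at h
      rw [ih (out ++ [l]) (size + PySem.Str.len l + 1)]
      have hc := pvCnt_nonneg rest (size + PySem.Str.len l + 1) mc
      have hk : max 0 (min (ml - (out.length:Int)) (if size + PySem.Str.len l + 1 ≤ mc then 1 + pvCnt rest (size + PySem.Str.len l + 1) mc else 0)) = max 0 (min (ml - ((out ++ [l]).length:Int)) (pvCnt rest (size + PySem.Str.len l + 1) mc)) + 1 := by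
        rw [if_pos (by omega : size + PySem.Str.len l + 1 ≤ mc)]
        simp only [List.length_append, List.length_cons, List.length_nil]
        push_cast; omega
      simp only [hk]
      have ht : (max 0 (min (ml - ((out ++ [l]).length:Int)) (pvCnt rest (size + PySem.Str.len l + 1) mc)) + 1).toNat = (max 0 (min (ml - ((out ++ [l]).length:Int)) (pvCnt rest (size + PySem.Str.len l + 1) mc))).toNat + 1 := by omega
      simp only [ht, List.take_succ_cons, List.length_cons]
      simp only [Prod.mk.injEq]
      constructor
      · simp
      · simp only [decide_eq_decide]
        push_cast; omega

lemma pvLen_nonneg (l : String) : 0 ≤ PySem.Str.len l := by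
  simp [PySem.Str.len_eq]

lemma pvCum_length (lines : List String) (s : Int) : (pvCum s lines).length = lines.length := by
  induction lines generalizing s with
  | nil => rfl
  | cons l r ih => simp [pvCum, ih]

lemma pvCum_gt (lines : List String) (s : Int) : ∀ x ∈ pvCum s lines, s < x := by
  induction lines generalizing s with
  | nil => simp [pvCum]
  | cons l r ih =>
    intro x hx
    simp only [pvCum, List.mem_cons] at hx
    have hl := pvLen_nonneg l
    rcases hx with rfl | hx
    · omega
    · have := ih (s + PySem.Str.len l + 1) x hx; omega

lemma pvCum_sorted (lines : List String) (s : Int) :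
    (pvCum s lines).Pairwise (fun a b => a ≤ b) := by
  induction lines generalizing s with
  | nil => simp [pvCum]
  | cons l r ih =>
    simp only [pvCum, List.pairwise_cons]
    refine ⟨fun x hx => le_of_lt (pvCum_gt r _ x hx), ih _⟩

lemma pvCnt_le_length (lines : List String) (s mc : Int) :
    pvCnt lines s mc ≤ lines.length := by
  induction lines generalizing s with
  | nil => simp [pvCnt]
  | cons l r ih =>
    simp only [pvCnt, List.length_cons]
    split
    · have := ih (s + PySem.Str.len l + 1); push_cast; omega
    · push_cast; positivity

-- pvCnt counts exactly the prefix of the cumulative-size list that fits within mc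
lemma pvCnt_prefix (lines : List String) (s mc : Int) (j : Nat) (hj : j < (pvCum s lines).length) :
    ((j : Int) < pvCnt lines s mc → (pvCum s lines)[j] ≤ mc) ∧
    (pvCnt lines s mc ≤ (j : Int) → mc < (pvCum s lines)[j]) := by
  induction lines generalizing s j with
  | nil => simp [pvCum] at hj
  | cons l r ih =>
    have hc := pvCnt_nonneg r (s + PySem.Str.len l + 1) mc
    cases j with
    | zero =>
      simp only [pvCum, pvCnt, List.getElem_cons_zero]
      constructor
      · intro h
        by_contra hmc
        rw [if_neg (by omega)] at h
        omega
      · intro h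
        by_contra hmc
        rw [if_pos (by omega)] at h
        omega
    | succ j =>
      simp only [pvCum, List.length_cons] at hj
      simp only [pvCum, pvCnt, List.getElem_cons_succ]
      by_cases hmc : s + PySem.Str.len l + 1 ≤ mc
      · rw [if_pos hmc]
        have := ih (s + PySem.Str.len l + 1) j (by omega)
        constructor
        · intro h; exact this.1 (by push_cast at *; omega)
        · intro h; exact this.2 (by push_cast at *; omega)
      · rw [if_neg hmc]
        constructor
        · intro h; push_cast at h; omega
        · intro _
          have hx : (pvCum (s + PySem.Str.len l + 1) r)[j] ∈ pvCum (s + PySem.Str.len l + 1) r := List.getElem_mem _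
          have := pvCum_gt r (s + PySem.Str.len l + 1) _ hx
          omega

-- the greedy count is exactly bisect_right of the sorted cumulative-size list
lemma pvCnt_eq_bisect (lines : List String) (mc : Int) :
    pvCnt lines 0 mc = ((PySem.List.bisectRight (pvCum 0 lines) mc : Nat) : Int) := by
  obtain ⟨h1, h2, h3⟩ := PySem.List.bisectRight_spec (pvCum 0 lines) mc (pvCum_sorted lines 0)
  set n := PySem.List.bisectRight (pvCum 0 lines) mc with hn
  have hk0 := pvCnt_nonneg lines 0 mc
  have hkl := pvCnt_le_length lines 0 mc
  have hcl := pvCum_length lines 0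
  rcases lt_trichotomy (pvCnt lines 0 mc) (n : Int) with h | h | h
  · exfalso
    have hj : (pvCnt lines 0 mc).toNat < (pvCum 0 lines).length := by omega
    have ha := (pvCnt_prefix lines 0 mc (pvCnt lines 0 mc).toNat hj).2 (by omega)
    have hb := h2 (pvCnt lines 0 mc).toNat hj (by omega)
    omega
  · exact h
  · exfalso
    have hj : n < (pvCum 0 lines).length := by omega
    have ha := (pvCnt_prefix lines 0 mc n hj).1 (by omega)
    have hb := h3 n hj (by omega)
    omega

-- ===== VERDICT (by name: the statement is the Claim_ definition above) =====
theorem summarize_file_tree_spec : Claim_equal_summarize_file_tree := by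
  intro ft ml mc _
  unfold Spec_summarize_file_tree summarize_file_tree summarize_file_tree_alt
  rw [pvLoopA_eq, pvCnt_eq_bisect]
  simp [PySem.List.len_eq]
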